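-- pv_equiv track=rewrite | github.com/projeto-de-algoritmos/DC-IgorPaivaThiagoLopes | src/image.py | prev_power_of_2
-- ===== SOURCE A (Python) =====
-- def prev_power_of_2(num):
--     prev = 2 << 1
--
--     for i in range(2, 16):
--         current = 2 << i
--
--         if current > num:
--             return prev
--
--         prev = current
--
--     return prev
-- ===== SOURCE B (Python) =====
-- def prev_power_of_2(num):
--     if num < 8:
--         return 4
--     if num >= 65536:
--         return 65536
--     return 1 << (num.bit_length() - 1)
-- ===== Notes on version B (the rewrite author's own statement) =====
-- stated objective: idiomatic
-- what changed: Replaces the fixed 2..16 scan over shifted powers by a closed form: clamp below 8 to 4 and at/above 65536 to 65536, otherwise 1 << (bit_length - 1).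
import Mathlib
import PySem

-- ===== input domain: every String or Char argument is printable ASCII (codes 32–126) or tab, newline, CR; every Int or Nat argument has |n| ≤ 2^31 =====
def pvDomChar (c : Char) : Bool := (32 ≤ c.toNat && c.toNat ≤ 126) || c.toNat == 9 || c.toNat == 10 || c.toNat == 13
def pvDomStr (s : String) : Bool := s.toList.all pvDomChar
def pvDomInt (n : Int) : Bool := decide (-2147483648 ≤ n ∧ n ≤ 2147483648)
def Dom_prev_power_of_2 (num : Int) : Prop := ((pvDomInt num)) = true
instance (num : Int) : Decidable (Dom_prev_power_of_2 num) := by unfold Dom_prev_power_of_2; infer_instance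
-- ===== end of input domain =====

-- B replaces A's fixed 14-step scan by a closed form from the bit length (objective: idiomatic).

-- ===== PORT A =====
-- the for-loop over range(2, 16) with early return; `2 << i` = 2 * 2^i (i ≥ 0 throughout)
def pvLoopA (num : Int) (prev : Int) : List Int → Int
  | [] => prev
  | i :: rest =>
      let current : Int := 2 * 2 ^ i.toNat
      if current > num then prev else pvLoopA num current rest

def prev_power_of_2 (num : Int) : Int :=
  pvLoopA num (2 * 2 ^ 1) (PySem.List.pyRange 2 16 1)

-- ===== PORT B =====
-- int.bit_length(): number of binary digits, bit_length 0 = 0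
def pvBitLength (n : Nat) : Nat :=
  if n = 0 then 0 else pvBitLength (n / 2) + 1
termination_by n
decreasing_by omega

def prev_power_of_2_alt (num : Int) : Int :=
  if num < 8 then 4
  else if num ≥ 65536 then 65536
  else ((1 <<< (pvBitLength num.toNat - 1) : Nat) : Int)

-- ===== PRECONDITION & SPEC =====
def Spec_prev_power_of_2 (num : Int) (out : Int) : Prop := out = prev_power_of_2_alt num
instance (num : Int) (out : Int) : Decidable (Spec_prev_power_of_2 num out) := by unfold Spec_prev_power_of_2; infer_instance

-- ===== CLAIM (what is proved, stated in full; the proofs are below) =====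
def Claim_equal_prev_power_of_2 : Prop := ∀ (num : Int), Dom_prev_power_of_2 num → Spec_prev_power_of_2 num (prev_power_of_2 num)

-- ===== LEMMAS AND PROOFS =====

lemma pvBitLength_eq (k : Nat) : ∀ n : Nat, 2 ^ k ≤ n → n < 2 ^ (k + 1) → pvBitLength n = k + 1 := by
  induction k with
  | zero =>
      intro n h1 h2
      have : n = 1 := by omega
      subst this
      rw [pvBitLength, if_neg (by omega), pvBitLength, if_pos rfl]
  | succ k ih =>
      intro n h1 h2
      have hp : (2 : Nat) ^ (k + 1) = 2 * 2 ^ k := by ring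
      have hp2 : (2 : Nat) ^ (k + 2) = 4 * 2 ^ k := by ring
      rw [hp] at h1; rw [hp2] at h2
      have hd1 : 2 ^ k ≤ n / 2 := by omega
      have hd2 : n / 2 < 2 ^ (k + 1) := by rw [hp]; omega
      have hn : n ≠ 0 := by
        have := Nat.one_le_two_pow (n := k)
        omega
      rw [pvBitLength, if_neg hn, ih (n / 2) hd1 hd2]

lemma pyRange_val : PySem.List.pyRange 2 16 1 = [2,3,4,5,6,7,8,9,10,11,12,13,14,15] := by decide

lemma pvLoopA_cons (num prev i : Int) (rest : List Int) :
    pvLoopA num prev (i :: rest) =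
      if 2 * 2 ^ i.toNat > num then prev else pvLoopA num (2 * 2 ^ i.toNat) rest := by
  rw [pvLoopA]

lemma pvLoopA_nil (num prev : Int) : pvLoopA num prev [] = prev := by rw [pvLoopA]

-- ===== VERDICT (by name: the statement is the Claim_ definition above) =====
theorem prev_power_of_2_spec : Claim_equal_prev_power_of_2 := by
  intro num _
  unfold Spec_prev_power_of_2
  by_cases h1 : num < 8
  · rw [prev_power_of_2_alt, if_pos h1]
    rw [prev_power_of_2, pyRange_val]
    rw [pvLoopA_cons, if_pos (by simp; omega)]
    decide
  by_cases h2 : num ≥ 65536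
  · rw [prev_power_of_2_alt, if_neg h1, if_pos h2]
    rw [prev_power_of_2, pyRange_val]
    rw [pvLoopA_cons, if_neg (by simp; omega)]
    rw [pvLoopA_cons, if_neg (by simp; omega)]
    rw [pvLoopA_cons, if_neg (by simp; omega)]
    rw [pvLoopA_cons, if_neg (by simp; omega)]
    rw [pvLoopA_cons, if_neg (by simp; omega)]
    rw [pvLoopA_cons, if_neg (by simp; omega)]
    rw [pvLoopA_cons, if_neg (by simp; omega)]
    rw [pvLoopA_cons, if_neg (by simp; omega)]
    rw [pvLoopA_cons, if_neg (by simp; omega)]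
    rw [pvLoopA_cons, if_neg (by simp; omega)]
    rw [pvLoopA_cons, if_neg (by simp; omega)]
    rw [pvLoopA_cons, if_neg (by simp; omega)]
    rw [pvLoopA_cons, if_neg (by simp; omega)]
    rw [pvLoopA_cons, if_neg (by simp; omega)]
    rw [pvLoopA_nil]
    decide
  by_cases hle3 : num < 16
  · have hb : pvBitLength num.toNat = 4 := pvBitLength_eq 3 num.toNat (by norm_num; omega) (by norm_num; omega)
    rw [prev_power_of_2_alt, if_neg (by omega), if_neg (by omega), hb]
    norm_num [Nat.shiftLeft_eq]
    rw [prev_power_of_2, pyRange_val]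
    rw [pvLoopA_cons, if_neg (by simp; omega)]
    rw [pvLoopA_cons, if_pos (by simp; omega)]
    decide
  by_cases hle4 : num < 32
  · have hb : pvBitLength num.toNat = 5 := pvBitLength_eq 4 num.toNat (by norm_num; omega) (by norm_num; omega)
    rw [prev_power_of_2_alt, if_neg (by omega), if_neg (by omega), hb]
    norm_num [Nat.shiftLeft_eq]
    rw [prev_power_of_2, pyRange_val]
    rw [pvLoopA_cons, if_neg (by simp; omega)]
    rw [pvLoopA_cons, if_neg (by simp; omega)]
    rw [pvLoopA_cons, if_pos (by simp; omega)]
    decide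
  by_cases hle5 : num < 64
  · have hb : pvBitLength num.toNat = 6 := pvBitLength_eq 5 num.toNat (by norm_num; omega) (by norm_num; omega)
    rw [prev_power_of_2_alt, if_neg (by omega), if_neg (by omega), hb]
    norm_num [Nat.shiftLeft_eq]
    rw [prev_power_of_2, pyRange_val]
    rw [pvLoopA_cons, if_neg (by simp; omega)]
    rw [pvLoopA_cons, if_neg (by simp; omega)]
    rw [pvLoopA_cons, if_neg (by simp; omega)]
    rw [pvLoopA_cons, if_pos (by simp; omega)]
    decide
  by_cases hle6 : num < 128
  · have hb : pvBitLength num.toNat = 7 := pvBitLength_eq 6 num.toNat (by norm_num; omega) (by norm_num; omega)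
    rw [prev_power_of_2_alt, if_neg (by omega), if_neg (by omega), hb]
    norm_num [Nat.shiftLeft_eq]
    rw [prev_power_of_2, pyRange_val]
    rw [pvLoopA_cons, if_neg (by simp; omega)]
    rw [pvLoopA_cons, if_neg (by simp; omega)]
    rw [pvLoopA_cons, if_neg (by simp; omega)]
    rw [pvLoopA_cons, if_neg (by simp; omega)]
    rw [pvLoopA_cons, if_pos (by simp; omega)]
    decide
  by_cases hle7 : num < 256
  · have hb : pvBitLength num.toNat = 8 := pvBitLength_eq 7 num.toNat (by norm_num; omega) (by norm_num; omega)
    rw [prev_power_of_2_alt, if_neg (by omega), if_neg (by omega), hb]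
    norm_num [Nat.shiftLeft_eq]
    rw [prev_power_of_2, pyRange_val]
    rw [pvLoopA_cons, if_neg (by simp; omega)]
    rw [pvLoopA_cons, if_neg (by simp; omega)]
    rw [pvLoopA_cons, if_neg (by simp; omega)]
    rw [pvLoopA_cons, if_neg (by simp; omega)]
    rw [pvLoopA_cons, if_neg (by simp; omega)]
    rw [pvLoopA_cons, if_pos (by simp; omega)]
    decide
  by_cases hle8 : num < 512
  · have hb : pvBitLength num.toNat = 9 := pvBitLength_eq 8 num.toNat (by norm_num; omega) (by norm_num; omega)
    rw [prev_power_of_2_alt, if_neg (by omega), if_neg (by omega), hb]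
    norm_num [Nat.shiftLeft_eq]
    rw [prev_power_of_2, pyRange_val]
    rw [pvLoopA_cons, if_neg (by simp; omega)]
    rw [pvLoopA_cons, if_neg (by simp; omega)]
    rw [pvLoopA_cons, if_neg (by simp; omega)]
    rw [pvLoopA_cons, if_neg (by simp; omega)]
    rw [pvLoopA_cons, if_neg (by simp; omega)]
    rw [pvLoopA_cons, if_neg (by simp; omega)]
    rw [pvLoopA_cons, if_pos (by simp; omega)]
    decide
  by_cases hle9 : num < 1024
  · have hb : pvBitLength num.toNat = 10 := pvBitLength_eq 9 num.toNat (by norm_num; omega) (by norm_num; omega)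
    rw [prev_power_of_2_alt, if_neg (by omega), if_neg (by omega), hb]
    norm_num [Nat.shiftLeft_eq]
    rw [prev_power_of_2, pyRange_val]
    rw [pvLoopA_cons, if_neg (by simp; omega)]
    rw [pvLoopA_cons, if_neg (by simp; omega)]
    rw [pvLoopA_cons, if_neg (by simp; omega)]
    rw [pvLoopA_cons, if_neg (by simp; omega)]
    rw [pvLoopA_cons, if_neg (by simp; omega)]
    rw [pvLoopA_cons, if_neg (by simp; omega)]
    rw [pvLoopA_cons, if_neg (by simp; omega)]
    rw [pvLoopA_cons, if_pos (by simp; omega)]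
    decide
  by_cases hle10 : num < 2048
  · have hb : pvBitLength num.toNat = 11 := pvBitLength_eq 10 num.toNat (by norm_num; omega) (by norm_num; omega)
    rw [prev_power_of_2_alt, if_neg (by omega), if_neg (by omega), hb]
    norm_num [Nat.shiftLeft_eq]
    rw [prev_power_of_2, pyRange_val]
    rw [pvLoopA_cons, if_neg (by simp; omega)]
    rw [pvLoopA_cons, if_neg (by simp; omega)]
    rw [pvLoopA_cons, if_neg (by simp; omega)]
    rw [pvLoopA_cons, if_neg (by simp; omega)]
    rw [pvLoopA_cons, if_neg (by simp; omega)]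
    rw [pvLoopA_cons, if_neg (by simp; omega)]
    rw [pvLoopA_cons, if_neg (by simp; omega)]
    rw [pvLoopA_cons, if_neg (by simp; omega)]
    rw [pvLoopA_cons, if_pos (by simp; omega)]
    decide
  by_cases hle11 : num < 4096
  · have hb : pvBitLength num.toNat = 12 := pvBitLength_eq 11 num.toNat (by norm_num; omega) (by norm_num; omega)
    rw [prev_power_of_2_alt, if_neg (by omega), if_neg (by omega), hb]
    norm_num [Nat.shiftLeft_eq]
    rw [prev_power_of_2, pyRange_val]
    rw [pvLoopA_cons, if_neg (by simp; omega)]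
    rw [pvLoopA_cons, if_neg (by simp; omega)]
    rw [pvLoopA_cons, if_neg (by simp; omega)]
    rw [pvLoopA_cons, if_neg (by simp; omega)]
    rw [pvLoopA_cons, if_neg (by simp; omega)]
    rw [pvLoopA_cons, if_neg (by simp; omega)]
    rw [pvLoopA_cons, if_neg (by simp; omega)]
    rw [pvLoopA_cons, if_neg (by simp; omega)]
    rw [pvLoopA_cons, if_neg (by simp; omega)]
    rw [pvLoopA_cons, if_pos (by simp; omega)]
    decide
  by_cases hle12 : num < 8192
  · have hb : pvBitLength num.toNat = 13 := pvBitLength_eq 12 num.toNat (by norm_num; omega) (by norm_num; omega)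
    rw [prev_power_of_2_alt, if_neg (by omega), if_neg (by omega), hb]
    norm_num [Nat.shiftLeft_eq]
    rw [prev_power_of_2, pyRange_val]
    rw [pvLoopA_cons, if_neg (by simp; omega)]
    rw [pvLoopA_cons, if_neg (by simp; omega)]
    rw [pvLoopA_cons, if_neg (by simp; omega)]
    rw [pvLoopA_cons, if_neg (by simp; omega)]
    rw [pvLoopA_cons, if_neg (by simp; omega)]
    rw [pvLoopA_cons, if_neg (by simp; omega)]
    rw [pvLoopA_cons, if_neg (by simp; omega)]
    rw [pvLoopA_cons, if_neg (by simp; omega)]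
    rw [pvLoopA_cons, if_neg (by simp; omega)]
    rw [pvLoopA_cons, if_neg (by simp; omega)]
    rw [pvLoopA_cons, if_pos (by simp; omega)]
    decide
  by_cases hle13 : num < 16384
  · have hb : pvBitLength num.toNat = 14 := pvBitLength_eq 13 num.toNat (by norm_num; omega) (by norm_num; omega)
    rw [prev_power_of_2_alt, if_neg (by omega), if_neg (by omega), hb]
    norm_num [Nat.shiftLeft_eq]
    rw [prev_power_of_2, pyRange_val]
    rw [pvLoopA_cons, if_neg (by simp; omega)]
    rw [pvLoopA_cons, if_neg (by simp; omega)]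
    rw [pvLoopA_cons, if_neg (by simp; omega)]
    rw [pvLoopA_cons, if_neg (by simp; omega)]
    rw [pvLoopA_cons, if_neg (by simp; omega)]
    rw [pvLoopA_cons, if_neg (by simp; omega)]
    rw [pvLoopA_cons, if_neg (by simp; omega)]
    rw [pvLoopA_cons, if_neg (by simp; omega)]
    rw [pvLoopA_cons, if_neg (by simp; omega)]
    rw [pvLoopA_cons, if_neg (by simp; omega)]
    rw [pvLoopA_cons, if_neg (by simp; omega)]
    rw [pvLoopA_cons, if_pos (by simp; omega)]
    decide
  by_cases hle14 : num < 32768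
  · have hb : pvBitLength num.toNat = 15 := pvBitLength_eq 14 num.toNat (by norm_num; omega) (by norm_num; omega)
    rw [prev_power_of_2_alt, if_neg (by omega), if_neg (by omega), hb]
    norm_num [Nat.shiftLeft_eq]
    rw [prev_power_of_2, pyRange_val]
    rw [pvLoopA_cons, if_neg (by simp; omega)]
    rw [pvLoopA_cons, if_neg (by simp; omega)]
    rw [pvLoopA_cons, if_neg (by simp; omega)]
    rw [pvLoopA_cons, if_neg (by simp; omega)]
    rw [pvLoopA_cons, if_neg (by simp; omega)]
    rw [pvLoopA_cons, if_neg (by simp; omega)]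
    rw [pvLoopA_cons, if_neg (by simp; omega)]
    rw [pvLoopA_cons, if_neg (by simp; omega)]
    rw [pvLoopA_cons, if_neg (by simp; omega)]
    rw [pvLoopA_cons, if_neg (by simp; omega)]
    rw [pvLoopA_cons, if_neg (by simp; omega)]
    rw [pvLoopA_cons, if_neg (by simp; omega)]
    rw [pvLoopA_cons, if_pos (by simp; omega)]
    decide
  have hb : pvBitLength num.toNat = 16 := pvBitLength_eq 15 num.toNat (by norm_num; omega) (by norm_num; omega)
  rw [prev_power_of_2_alt, if_neg (by omega), if_neg (by omega), hb]
  norm_num [Nat.shiftLeft_eq]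
  rw [prev_power_of_2, pyRange_val]
  rw [pvLoopA_cons, if_neg (by simp; omega)]
  rw [pvLoopA_cons, if_neg (by simp; omega)]
  rw [pvLoopA_cons, if_neg (by simp; omega)]
  rw [pvLoopA_cons, if_neg (by simp; omega)]
  rw [pvLoopA_cons, if_neg (by simp; omega)]
  rw [pvLoopA_cons, if_neg (by simp; omega)]
  rw [pvLoopA_cons, if_neg (by simp; omega)]
  rw [pvLoopA_cons, if_neg (by simp; omega)]
  rw [pvLoopA_cons, if_neg (by simp; omega)]
  rw [pvLoopA_cons, if_neg (by simp; omega)]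
  rw [pvLoopA_cons, if_neg (by simp; omega)]
  rw [pvLoopA_cons, if_neg (by simp; omega)]
  rw [pvLoopA_cons, if_neg (by simp; omega)]
  rw [pvLoopA_cons, if_pos (by simp; omega)]
  decide
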